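-- pv_equiv track=rewrite | github.com/barbaraeguche/leetcode | easy/check-if-binary-string-has-at-most-one-segment-of-ones.py | checkOnesSegment
-- ===== SOURCE A (Python) =====
-- def checkOnesSegment(s: str) -> bool:
-- 	string = ""
--
-- 	for char in s:
-- 		if char == "1":
-- 			string += char
-- 		else:
-- 			string += " "
--
-- 	return len(string.split()) == 1
-- ===== SOURCE B (Python) =====
-- def checkOnesSegment(s: str) -> bool:
-- 	runs = 0
-- 	prev = False
-- 	for char in s:
-- 		cur = char == "1"
-- 		if cur and not prev:
-- 			runs += 1
-- 		prev = cur
-- 	return runs == 1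
-- ===== Notes on version B (the rewrite author's own statement) =====
-- stated objective: simpler
-- what changed: B counts maximal runs of the digit one in a single pass with a run counter instead of building a space-substituted copy of the string and counting its split() pieces.
import Mathlib
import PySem

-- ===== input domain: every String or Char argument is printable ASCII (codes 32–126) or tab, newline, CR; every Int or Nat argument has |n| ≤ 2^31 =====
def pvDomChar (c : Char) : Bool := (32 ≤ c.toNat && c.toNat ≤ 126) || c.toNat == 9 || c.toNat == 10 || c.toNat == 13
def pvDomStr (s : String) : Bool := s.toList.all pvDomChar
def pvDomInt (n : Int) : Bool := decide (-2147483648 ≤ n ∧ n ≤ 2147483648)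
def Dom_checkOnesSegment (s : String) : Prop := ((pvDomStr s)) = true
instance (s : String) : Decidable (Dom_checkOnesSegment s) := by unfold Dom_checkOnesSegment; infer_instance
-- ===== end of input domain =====

-- B counts maximal runs of '1' in a single pass instead of building a space-substituted string and counting split() pieces (simpler, O(1) extra space).


-- ===== PORT A =====
-- string = ""; for char in s: string += char if char == "1" else " "; return len(string.split()) == 1
def checkOnesSegment (s : String) : Bool :=
  let string : List Char :=
    s.toList.foldl (fun acc char => if char == '1' then acc ++ [char] else acc ++ [' ']) []
  (PySem.Chars.split₀ string).length == 1

-- ===== PORT B =====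
-- runs = 0; prev = False; for char in s: cur = (char == "1"); if cur and not prev: runs += 1; prev = cur; return runs == 1
def checkOnesSegment_alt (s : String) : Bool :=
  let r :=
    s.toList.foldl
      (fun (p : Int × Bool) char =>
        let cur := char == '1'
        (if cur && !p.2 then p.1 + 1 else p.1, cur))
      (0, false)
  r.1 == 1

-- ===== PRECONDITION & SPEC =====
def Spec_checkOnesSegment (s : String) (out : Bool) : Prop := out = checkOnesSegment_alt s
instance (s : String) (out : Bool) : Decidable (Spec_checkOnesSegment s out) := by unfold Spec_checkOnesSegment; infer_instance

-- ===== CLAIM (what is proved, stated in full; the proofs are below) =====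
def Claim_equal_checkOnesSegment : Prop := ∀ (s : String), Dom_checkOnesSegment s → Spec_checkOnesSegment s (checkOnesSegment s)

-- ===== LEMMAS AND PROOFS =====

-- number of runs of '1' that close in l, counting an open run (prev = true) as one run
def pvRC (l : List Char) (prev : Bool) : Nat :=
  match l with
  | [] => if prev then 1 else 0
  | c :: rest => if c = '1' then pvRC rest true
                 else (if prev then 1 else 0) + pvRC rest false

-- number of runs of '1' that START in l, given whether we are currently inside a run
def pvRS (l : List Char) (prev : Bool) : Nat :=
  match l with
  | c :: rest => if c = '1' then (if prev then 0 else 1) + pvRS rest true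
                 else pvRS rest false
  | [] => 0

-- A's character-by-character string build is the map c ↦ (c if c = '1' else ' ')
theorem pv_foldl_build (l : List Char) (a : List Char) :
    l.foldl (fun acc char => if char == '1' then acc ++ [char] else acc ++ [' ']) a
      = a ++ l.map (fun c => if c = '1' then '1' else ' ') := by
  induction l generalizing a with
  | nil => simp
  | cons c rest ih =>
    rw [List.foldl_cons, ih, List.map_cons]
    by_cases h : c = '1' <;> simp [h]

-- length of split₀.go on the substituted list = closed acc pieces + runs in the remainder
theorem pv_go_length (l : List Char) (cur : List Char) (acc : List (List Char)) :
    (PySem.Chars.split₀.go (l.map (fun c => if c = '1' then '1' else ' ')) cur acc).length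
      = acc.length + pvRC l (!cur.isEmpty) := by
  induction l generalizing cur acc with
  | nil =>
    cases cur <;> simp [PySem.Chars.split₀.go, pvRC]
  | cons c rest ih =>
    by_cases h : c = '1'
    · have h1 : PySem.Chars.isspace '1' = false := by decide
      simp [h, PySem.Chars.split₀.go, h1, ih, pvRC]
    · have h2 : PySem.Chars.isspace ' ' = true := by decide
      cases cur <;>
        simp [h, PySem.Chars.split₀.go, h2, ih, pvRC] <;> omega

-- closing count = starting count + the possibly open final run
theorem pv_rc_eq_rs (l : List Char) (prev : Bool) :
    pvRC l prev = pvRS l prev + (if prev then 1 else 0) := by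
  induction l generalizing prev with
  | nil => simp [pvRC, pvRS]
  | cons c rest ih =>
    by_cases h : c = '1' <;> cases prev <;> simp [pvRC, pvRS, h, ih] <;> omega

-- B's fold adds the number of run starts to the counter
theorem pv_foldl_runs (l : List Char) (r : Int) (prev : Bool) :
    (l.foldl
      (fun (p : Int × Bool) char =>
        let cur := char == '1'
        (if cur && !p.2 then p.1 + 1 else p.1, cur))
      (r, prev)).1 = r + (pvRS l prev : Int) := by
  induction l generalizing r prev with
  | nil => simp [pvRS]
  | cons c rest ih =>
    rw [List.foldl_cons]
    show (List.foldl _ (_, c == '1') rest).1 = _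
    rw [ih]
    by_cases h : c = '1'
    · cases prev <;> simp [pvRS, h] <;> push_cast <;> omega
    · have hb : (c == '1') = false := by simp [h]
      cases prev <;> simp [pvRS, h, hb]

-- ===== VERDICT (by name: the statement is the Claim_ definition above) =====
theorem checkOnesSegment_spec : Claim_equal_checkOnesSegment := by
  intro s _
  unfold Spec_checkOnesSegment checkOnesSegment checkOnesSegment_alt
  dsimp only
  rw [pv_foldl_build, pv_foldl_runs, List.nil_append]
  unfold PySem.Chars.split₀
  rw [pv_go_length, pv_rc_eq_rs]
  simp only [List.length_nil, List.isEmpty_nil, Bool.not_true, Bool.false_eq_true,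
    if_false, Nat.zero_add, Nat.add_zero, Int.zero_add]
  rcases Nat.decEq (pvRS s.toList false) 1 with h | h
  · simp [h]
  · simp [h]
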